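-- pv_equiv track=rewrite | github.com/NeilJoseph019/Cloud_Computing_Project-2 | Service.py | subWordSort
-- ===== SOURCE A (Python) =====
-- from itertools import permutations
--
-- def subWordSort(word):
--     listWord = list(word)
--     word_keys = []
--     for i in range(3,len(word)+1):
--         temp=(["".join(c)for c in permutations(word,i)])
--         for c in temp:
--             word_keys.append(c)
--     return word_keys
-- ===== SOURCE B (Python) =====
-- def subWordSort(word):
--     # Iterative level-by-level expansion: level d holds every (prefix, remaining)
--     # pair where prefix is a d-permutation of the word; each step extends every
--     # pair by one remaining character picked by position, left to right, which
--     # reproduces itertools.permutations' exact order and keeps duplicate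
--     # letters.  Prefixes of levels 3..len(word) are collected in order.
--     n = len(word)
--     result = []
--     level = [('', word)]
--     for d in range(1, n + 1):
--         level = [(p + rem[j], rem[:j] + rem[j + 1:])
--                  for (p, rem) in level for j in range(len(rem))]
--         if 3 <= d:
--             result.extend(p for (p, _) in level)
--     return result
-- ===== Notes on version B (the rewrite author's own statement) =====
-- stated objective: alternative
-- what changed: Replaces the per-length itertools.permutations calls with an iterative level-by-level expansion of (prefix, remaining) pairs: each step extends every pair by one remaining character picked by position, and the prefixes of levels 3..len(word) are collected in order, so each partial permutation is built once instead of once per target length.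
import Mathlib
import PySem

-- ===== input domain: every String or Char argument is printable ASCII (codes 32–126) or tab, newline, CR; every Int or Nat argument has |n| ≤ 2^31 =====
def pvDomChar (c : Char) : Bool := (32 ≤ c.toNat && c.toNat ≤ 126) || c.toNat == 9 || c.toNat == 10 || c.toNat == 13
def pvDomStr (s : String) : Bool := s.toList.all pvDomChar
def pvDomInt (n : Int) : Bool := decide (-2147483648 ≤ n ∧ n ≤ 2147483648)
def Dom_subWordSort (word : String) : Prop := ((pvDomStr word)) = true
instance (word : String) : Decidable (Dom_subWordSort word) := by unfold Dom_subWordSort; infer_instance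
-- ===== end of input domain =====

-- B replaces the itertools.permutations call with a hand-written recursive
-- pick-by-position permutation generator (alternative decomposition, same cost).

-- ===== PORT A =====
-- itertools.permutations(word, i) is ported by hand per its documented
-- pure-Python equivalent: every index tuple from product(range(n), repeat=i),
-- kept iff its i indices are pairwise distinct (Python's 'len(set(indices)) == i';
-- tuples of the product have length i, so that test means exactly Nodup),
-- mapped to the pooled characters.  Exact: same order, duplicates of equal
-- letters kept.
def prodIdx (n : Nat) : Nat → List (List Nat)
  | 0 => [[]]
  | r + 1 => (List.range n).flatMap (fun i => (prodIdx n r).map (fun t => i :: t))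

def permsA (pool : List Char) (r : Nat) : List (List Char) :=
  ((prodIdx pool.length r).filter (fun t => decide t.Nodup)).map
    (fun t => t.map (fun i => pool.getD i ' '))

def subWordSort (word : String) : List String :=
  let _listWord := word.toList          -- listWord = list(word): computed, never used by A
  (PySem.List.pyRange 3 (PySem.Str.len word + 1)).foldl
    (fun word_keys i =>
      -- i ranges over 3..len(word), so i ≥ 0 and i.toNat is exact
      let temp := (permsA word.toList i.toNat).map (fun c => String.ofList c)
      temp.foldl (fun acc c => acc ++ [c]) word_keys)
    []

-- ===== PORT B =====
-- one expansion step: extend every (prefix, remaining) pair by each remaining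
-- character picked by position j, left to right; rem[j] as getD is exact
-- (j < len rem), rem[:j] + rem[j+1:] = rem.eraseIdx j.  The Python prefix
-- string is modeled as its List Char ('+' = ++), String.ofList when collected.
def expandLevel (level : List (List Char × List Char)) : List (List Char × List Char) :=
  level.flatMap (fun pr => (List.range pr.2.length).map
    (fun j => (pr.1 ++ [pr.2.getD j ' '], pr.2.eraseIdx j)))

def subWordSort_alt (word : String) : List String :=
  let n := word.toList.length
  ((List.range' 1 n).foldl
    (fun (st : List (List Char × List Char) × List String) d =>
      let level := expandLevel st.1
      (level, if 3 ≤ d then st.2 ++ level.map (fun pr => String.ofList pr.1) else st.2))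
    ([([], word.toList)], [])).2

-- ===== PRECONDITION & SPEC =====
def Spec_subWordSort (word : String) (out : List String) : Prop := out = subWordSort_alt word
instance (word : String) (out : List String) : Decidable (Spec_subWordSort word out) := by unfold Spec_subWordSort; infer_instance

-- ===== CLAIM (what is proved, stated in full; the proofs are below) =====
def Claim_equal_subWordSort : Prop := ∀ (word : String), Dom_subWordSort word → Spec_subWordSort word (subWordSort word)

-- ===== LEMMAS AND PROOFS =====

-- proof-side helper: the pick-by-position r-permutation lists (the tree of B's
-- dfs, one target length at a time)
def permRec : List Char → Nat → List (List Char)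
  | _, 0 => [[]]
  | rem, r + 1 =>
    (List.range rem.length).flatMap (fun j =>
      (permRec (rem.eraseIdx j) r).map (fun tail => rem.getD j ' ' :: tail))

-- proof-side helper: value-level r-permutations of a list of available indices
def permIdxVal : List Nat → Nat → List (List Nat)
  | _, 0 => [[]]
  | avail, r + 1 =>
    avail.flatMap (fun i => (permIdxVal (avail.erase i) r).map (fun t => i :: t))

theorem flatMap_congr_mem {α β : Type} {l : List α} {f g : α → List β}
    (h : ∀ x ∈ l, f x = g x) : l.flatMap f = l.flatMap g := by
  induction l with
  | nil => rfl
  | cons a l ih =>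
    simp only [List.flatMap_cons, h a (List.mem_cons_self), ih (fun x hx => h x (List.mem_cons_of_mem a hx))]

-- restricting a flatMap over a nodup list to a sublist
theorem flatMap_restrict {α : Type} (g : Nat → List α) :
    ∀ {s t : List Nat}, s.Sublist t → t.Nodup →
      (t.flatMap (fun i => if i ∈ s then g i else [])) = s.flatMap g := by
  intro s t hsl
  induction hsl with
  | slnil => intro _; simp
  | @cons l₁ l₂ a h ih =>
    intro hnd
    have hat : a ∉ l₂ := (List.nodup_cons.mp hnd).1
    have has : a ∉ l₁ := fun hin => hat (h.subset hin)
    rw [List.flatMap_cons, if_neg has, List.nil_append]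
    exact ih (List.nodup_cons.mp hnd).2
  | @cons₂ l₁ l₂ a h ih =>
    intro hnd
    have hat : a ∉ l₂ := (List.nodup_cons.mp hnd).1
    simp only [List.flatMap_cons, List.mem_cons, true_or, if_pos]
    congr 1
    rw [← ih (List.nodup_cons.mp hnd).2]
    apply flatMap_congr_mem
    intro x hx
    have hxa : ¬ x = a := fun he => hat (he ▸ hx)
    simp [hxa]

theorem mem_prodIdx_lt {n : Nat} : ∀ {r : Nat} {t : List Nat}, t ∈ prodIdx n r → ∀ i ∈ t, i < n := by
  intro r
  induction r with
  | zero => intro t ht i hi; simp [prodIdx] at ht; subst ht; simp at hi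
  | succ r ih =>
    intro t ht i hi
    simp only [prodIdx, List.mem_flatMap, List.mem_map, List.mem_range] at ht
    obtain ⟨a, ha, t', ht', rfl⟩ := ht
    rcases List.mem_cons.mp hi with rfl | hi'
    · exact ha
    · exact ih ht' i hi' 

theorem filter_prodIdx (n : Nat) :
    ∀ (r : Nat) (avail : List Nat), avail.Sublist (List.range n) →
      (prodIdx n r).filter (fun t => decide (t.Nodup ∧ ∀ i ∈ t, i ∈ avail)) = permIdxVal avail r := by
  intro r
  induction r with
  | zero => intro avail _; simp [prodIdx, permIdxVal]
  | succ r ih =>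
    intro avail hsub
    have hnd : avail.Nodup := List.Nodup.sublist hsub (List.nodup_range)
    have hbody : ∀ i : Nat,
        List.filter (fun t => decide (t.Nodup ∧ ∀ j ∈ t, j ∈ avail)) ((prodIdx n r).map (fun t => i :: t))
          = if i ∈ avail then ((permIdxVal (avail.erase i) r).map (fun t => i :: t)) else [] := by
      intro i
      by_cases hi : i ∈ avail
      · rw [if_pos hi, List.filter_map]
        have hpt : ∀ t : List Nat,
            ((fun t => decide (t.Nodup ∧ ∀ j ∈ t, j ∈ avail)) ∘ (fun t => i :: t)) t
              = (fun t => decide (t.Nodup ∧ ∀ j ∈ t, j ∈ avail.erase i)) t := by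
          intro t
          simp only [Function.comp_apply, decide_eq_decide]
          constructor
          · rintro ⟨hnodup, hmem⟩
            rcases List.nodup_cons.mp hnodup with ⟨hit, hnt⟩
            exact ⟨hnt, fun j hj => (List.Nodup.mem_erase_iff hnd).mpr
              ⟨fun he => hit (he ▸ hj), hmem j (List.mem_cons_of_mem _ hj)⟩⟩
          · rintro ⟨hnt, hmem⟩
            refine ⟨List.nodup_cons.mpr ⟨fun hit => ?_, hnt⟩, ?_⟩
            · exact ((List.Nodup.mem_erase_iff hnd).mp (hmem i hit)).1 rfl
            · intro j hj
              rcases List.mem_cons.mp hj with rfl | hj'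
              · exact hi
              · exact ((List.Nodup.mem_erase_iff hnd).mp (hmem j hj')).2
        rw [List.filter_congr (fun t _ => hpt t)]
        rw [ih (avail.erase i) (List.Sublist.trans List.erase_sublist hsub)]
      · rw [if_neg hi]
        apply List.filter_eq_nil_iff.mpr
        intro x hx
        rcases List.mem_map.mp hx with ⟨t, _, rfl⟩
        simp only [decide_eq_true_eq, not_and]
        intro _ hall
        exact absurd (hall i (List.mem_cons_self)) hi
    show List.filter _ ((List.range n).flatMap (fun i => (prodIdx n r).map (fun t => i :: t))) = _
    rw [List.filter_flatMap]
    rw [flatMap_congr_mem (fun i _ => hbody i)]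
    rw [flatMap_restrict (fun i => (permIdxVal (avail.erase i) r).map (fun t => i :: t)) hsub (List.nodup_range)]
    rfl

theorem filterA_eq (n r : Nat) :
    (prodIdx n r).filter (fun t => decide t.Nodup)
      = (prodIdx n r).filter (fun t => decide (t.Nodup ∧ ∀ i ∈ t, i ∈ List.range n)) := by
  apply List.filter_congr
  intro t ht
  simp only [decide_eq_decide, List.mem_range]
  exact (and_iff_left (mem_prodIdx_lt ht)).symm

-- proof-side helper: a list paired with the positions k, k+1, …
def idxPairs : List Char → Nat → List (Nat × Char)
  | [], _ => []
  | c :: cs, k => (k, c) :: idxPairs cs (k + 1)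

theorem map_snd_idxPairs : ∀ (l : List Char) (k : Nat), (idxPairs l k).map Prod.snd = l := by
  intro l
  induction l with
  | nil => intro k; rfl
  | cons c cs ih => intro k; simp [idxPairs, ih]

theorem map_fst_idxPairs : ∀ (l : List Char) (k : Nat), (idxPairs l k).map Prod.fst = List.range' k l.length := by
  intro l
  induction l with
  | nil => intro k; rfl
  | cons c cs ih => intro k; simp [idxPairs, ih, List.range'_succ]

theorem mem_idxPairs : ∀ (l : List Char) (k : Nat) (p : Nat × Char), p ∈ idxPairs l k →
    ∀ (pre : List Char), pre.length = k → (pre ++ l).getD p.1 ' ' = p.2 := by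
  intro l
  induction l with
  | nil => intro k p hp; simp [idxPairs] at hp
  | cons c cs ih =>
    intro k p hp pre hpre
    rcases List.mem_cons.mp hp with rfl | hp'
    · have hlt : k < (pre ++ c :: cs).length := by simp; omega
      rw [List.getD_eq_getElem _ _ hlt]
      rw [List.getElem_append_right (by omega)]
      simp [hpre]
    · have := ih (k + 1) p hp' (pre ++ [c]) (by simp [hpre])
      simpa [List.append_assoc] using this

theorem flatMap_erase_eq_idx {β : Type} :
    ∀ (avail : List Nat), avail.Nodup → ∀ (G : List Nat → Nat → List β),
      avail.flatMap (fun i => G (avail.erase i) i)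
        = (List.range avail.length).flatMap (fun j => G (avail.eraseIdx j) (avail.getD j 0)) := by
  intro avail
  induction avail with
  | nil => intro _ G; rfl
  | cons a l ih =>
    intro hnd G
    rcases List.nodup_cons.mp hnd with ⟨hal, hl⟩
    rw [List.flatMap_cons, List.erase_cons_head]
    rw [flatMap_congr_mem (l := l) (f := fun i => G ((a :: l).erase i) i)
      (g := fun i => G (a :: l.erase i) i) ?hcong]
    case hcong =>
      intro x hx
      have hax : ¬ (a == x) := by
        simp only [beq_iff_eq]
        exact fun he => hal (he ▸ hx)
      show G ((a :: l).erase x) x = G (a :: l.erase x) x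
      rw [List.erase_cons_tail hax]
    rw [List.length_cons, List.range_succ_eq_map, List.flatMap_cons, List.flatMap_map]
    simp only [List.eraseIdx_cons_zero, List.getD_cons_zero, List.eraseIdx_cons_succ,
      List.getD_cons_succ]
    rw [ih hl (fun rem i => G (a :: rem) i)]

theorem permRec_eq_idx (pool : List Char) :
    ∀ (r : Nat) (ipairs : List (Nat × Char)), (ipairs.map Prod.fst).Nodup →
      (∀ p ∈ ipairs, pool.getD p.1 ' ' = p.2) →
      permRec (ipairs.map Prod.snd) r
        = (permIdxVal (ipairs.map Prod.fst) r).map (fun t => t.map (fun i => pool.getD i ' ')) := by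
  intro r
  induction r with
  | zero => intro ipairs _ _; simp [permRec, permIdxVal]
  | succ r ih =>
    intro ipairs hnd hinv
    show (List.range (ipairs.map Prod.snd).length).flatMap _ = _
    rw [show permIdxVal (ipairs.map Prod.fst) (r + 1)
        = (ipairs.map Prod.fst).flatMap
            (fun i => (permIdxVal ((ipairs.map Prod.fst).erase i) r).map (fun t => i :: t)) from rfl]
    rw [List.map_flatMap]
    rw [flatMap_erase_eq_idx (ipairs.map Prod.fst) hnd
      (fun rem i => ((permIdxVal rem r).map (fun t => i :: t)).map (fun t => t.map (fun i => pool.getD i ' ')))]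
    rw [List.length_map, List.length_map]
    apply flatMap_congr_mem
    intro j hj
    have hjlen : j < ipairs.length := List.mem_range.mp hj
    have e1 : (ipairs.map Prod.snd).eraseIdx j = (ipairs.eraseIdx j).map Prod.snd :=
      List.eraseIdx_map _ _ _
    have e2 : (ipairs.map Prod.fst).eraseIdx j = (ipairs.eraseIdx j).map Prod.fst :=
      List.eraseIdx_map _ _ _
    have hgd2 : (ipairs.map Prod.snd).getD j ' ' = (ipairs[j]).2 := by
      rw [List.getD_eq_getElem _ _ (by simpa using hjlen), List.getElem_map]
    have hgd1 : (ipairs.map Prod.fst).getD j 0 = (ipairs[j]).1 := by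
      rw [List.getD_eq_getElem _ _ (by simpa using hjlen), List.getElem_map]
    have hinvj : pool.getD (ipairs[j]).1 ' ' = (ipairs[j]).2 := hinv _ (List.getElem_mem hjlen)
    have hnd' : ((ipairs.eraseIdx j).map Prod.fst).Nodup := by
      rw [← e2]; exact List.Nodup.sublist (List.eraseIdx_sublist _ j) hnd
    have hinv' : ∀ p ∈ ipairs.eraseIdx j, pool.getD p.1 ' ' = p.2 :=
      fun p hp => hinv p (List.mem_of_mem_eraseIdx hp)
    rw [e1, hgd2, ih (ipairs.eraseIdx j) hnd' hinv', e2, hgd1]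
    simp only [List.map_map]
    apply List.map_congr_left
    intro t _
    simp only [Function.comp_apply, List.map_cons]
    rw [hinvj]

theorem permsA_eq (pool : List Char) (r : Nat) : permsA pool r = permRec pool r := by
  unfold permsA
  rw [filterA_eq, filter_prodIdx pool.length r (List.range pool.length) (List.Sublist.refl _)]
  have h1 := permRec_eq_idx pool r (idxPairs pool 0)
    (by rw [map_fst_idxPairs]; exact List.nodup_range' 1)
    (fun p hp => by simpa using mem_idxPairs pool 0 p hp [] rfl)
  rw [map_snd_idxPairs, map_fst_idxPairs, ← List.range_eq_range'] at h1
  exact h1.symm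

-- proof-side helper: (prefix, remaining) pairs of every r-permutation, in order
def pairPerm : List Char → Nat → List (List Char × List Char)
  | rem, 0 => [([], rem)]
  | rem, r + 1 => (List.range rem.length).flatMap (fun j =>
      (pairPerm (rem.eraseIdx j) r).map (fun pr => (rem.getD j ' ' :: pr.1, pr.2)))

theorem map_fst_pairPerm : ∀ (r : Nat) (rem : List Char),
    (pairPerm rem r).map Prod.fst = permRec rem r := by
  intro r
  induction r with
  | zero => intro rem; rfl
  | succ r ih =>
    intro rem
    show ((List.range rem.length).flatMap _).map _ = (List.range rem.length).flatMap _
    rw [List.map_flatMap]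
    apply flatMap_congr_mem
    intro j _
    rw [List.map_map, ← ih (rem.eraseIdx j), List.map_map]
    rfl

theorem expand_map_cons (c : Char) (level : List (List Char × List Char)) :
    expandLevel (level.map (fun pr => (c :: pr.1, pr.2)))
      = (expandLevel level).map (fun pr => (c :: pr.1, pr.2)) := by
  unfold expandLevel
  rw [List.flatMap_map, List.map_flatMap]
  apply flatMap_congr_mem
  intro pr _
  rw [List.map_map]
  apply List.map_congr_left
  intro j _
  simp

theorem expand_pairPerm : ∀ (r : Nat) (rem : List Char),
    expandLevel (pairPerm rem r) = pairPerm rem (r + 1) := by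
  intro r
  induction r with
  | zero =>
    intro rem
    show expandLevel [([], rem)] = _
    unfold expandLevel
    rw [List.flatMap_singleton]
    show _ = (List.range rem.length).flatMap (fun j =>
      (pairPerm (rem.eraseIdx j) 0).map (fun pr => (rem.getD j ' ' :: pr.1, pr.2)))
    simp only [pairPerm, List.map_cons, List.map_nil, List.nil_append]
    exact List.map_eq_flatMap
  | succ r ih =>
    intro rem
    show expandLevel ((List.range rem.length).flatMap _) = _
    unfold expandLevel
    rw [List.flatMap_assoc]
    show (List.range rem.length).flatMap _
        = (List.range rem.length).flatMap (fun j =>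
            (pairPerm (rem.eraseIdx j) (r + 1)).map (fun pr => (rem.getD j ' ' :: pr.1, pr.2)))
    apply flatMap_congr_mem
    intro j _
    have h1 : ((pairPerm (rem.eraseIdx j) r).map
        (fun pr => (rem.getD j ' ' :: pr.1, pr.2))).flatMap
          (fun pr => (List.range pr.2.length).map
            (fun j' => (pr.1 ++ [pr.2.getD j' ' '], pr.2.eraseIdx j')))
        = expandLevel ((pairPerm (rem.eraseIdx j) r).map
            (fun pr => (rem.getD j ' ' :: pr.1, pr.2))) := rfl
    rw [h1, expand_map_cons, ih (rem.eraseIdx j)]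

theorem levels_inv (chars : List Char) : ∀ (m : Nat),
    (List.range' 1 m).foldl
      (fun (st : List (List Char × List Char) × List String) d =>
        let level := expandLevel st.1
        (level, if 3 ≤ d then st.2 ++ level.map (fun pr => String.ofList pr.1) else st.2))
      ([([], chars)], [])
    = (pairPerm chars m,
        (List.range' 3 (m + 1 - 3)).flatMap (fun r => (permRec chars r).map String.ofList)) := by
  intro m
  induction m with
  | zero => simp [pairPerm]
  | succ m ih =>
    rw [List.range'_concat, List.foldl_append, ih, List.foldl_cons, List.foldl_nil]
    simp only [Nat.one_mul]
    have hexp : expandLevel (pairPerm chars m) = pairPerm chars (m + 1) := expand_pairPerm m chars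
    by_cases h3 : 3 ≤ 1 + m
    · have hn1 : m + 1 + 1 - 3 = (m + 1 - 3) + 1 := by omega
      have hn2 : 3 + (m + 1 - 3) = 1 + m := by omega
      rw [hn1, List.range'_concat]
      simp only [Nat.one_mul, hn2]
      rw [List.flatMap_append, List.flatMap_singleton]
      simp only [hexp, if_pos h3]
      have : (pairPerm chars (m + 1)).map (fun pr => String.ofList pr.1)
          = (permRec chars (m + 1)).map String.ofList := by
        rw [← map_fst_pairPerm (m + 1) chars, List.map_map]
        rfl
      rw [this]
      have hm1 : m + 1 = 1 + m := by omega
      rw [hm1]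
    · have hn1 : m + 1 + 1 - 3 = 0 := by omega
      have hn2 : m + 1 - 3 = 0 := by omega
      simp only [hexp, if_neg h3, hn1, hn2]

-- ===== VERDICT (by name: the statement is the Claim_ definition above) =====
theorem subWordSort_spec : Claim_equal_subWordSort := by
  intro word _
  unfold Spec_subWordSort subWordSort subWordSort_alt
  simp only [PySem.List.foldl_append_singleton_eq_self, PySem.List.foldl_append_eq_flatMap,
    List.nil_append]
  rw [levels_inv word.toList word.toList.length]
  rw [PySem.Str.len_eq, PySem.List.pyRange_one, List.flatMap_map,
    List.range'_eq_map_range, List.flatMap_map]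
  have hm : ((word.toList.length : Int) + 1 - 3).toNat = word.toList.length + 1 - 3 := by omega
  rw [hm]
  apply flatMap_congr_mem
  intro k _
  have hk : ((3 : Int) + (k : Int)).toNat = 3 + k := by omega
  rw [hk, permsA_eq]
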